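-- pv_equiv track=rewrite | github.com/maxrross/website | python/scripts/str_component.py | permutation_result
-- ===== SOURCE A (Python) =====
-- from itertools import combinations_with_replacement, permutations, combinations
--
-- def permutation_result(nonmetal_list):
--     """
--     e.g. input: ["N", "C", "O",]
--     output: [('N', 'C', 'O'),('N', 'O', 'C'),('C', 'N', 'O'),('C', 'O', 'N'),('O', 'N', 'C'),('O', 'C', 'N')]
--     """
--     result = {}
--
--     # Generate all possible combinations of three elements
--     all_combinations = list(combinations(nonmetal_list, 3))
--
--     # Generate all possible permutations of three elements
--     all_permutations = list(permutations(nonmetal_list, 3))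
--
--     # Classify permutations based on their corresponding combinations
--     for combination in all_combinations:
--         related_permutations = [perm for perm in all_permutations if set(combination) == set(perm)]
--         result[combination] = related_permutations
--
--     return list(result.values())
-- ===== SOURCE B (Python) =====
-- from itertools import permutations, combinations
--
-- def permutation_result(nonmetal_list):
--     # Bucket the 3-permutations once by their canonical element-set key,
--     # then one pass over the 3-combinations looks each bucket up.
--     buckets = {}
--     for perm in permutations(nonmetal_list, 3):
--         key = tuple(sorted(set(perm)))
--         buckets.setdefault(key, []).append(perm)
--     result = {}
--     for comb in combinations(nonmetal_list, 3):
--         result[comb] = buckets.get(tuple(sorted(set(comb))), [])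
--     return list(result.values())
-- ===== Notes on version B (the rewrite author's own statement) =====
-- stated objective: faster
-- what changed: B buckets all 3-permutations once in a dict keyed by the canonical sorted element-set, then for each 3-combination looks its bucket up, removing A's full scan of all permutations per combination.
import Mathlib
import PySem

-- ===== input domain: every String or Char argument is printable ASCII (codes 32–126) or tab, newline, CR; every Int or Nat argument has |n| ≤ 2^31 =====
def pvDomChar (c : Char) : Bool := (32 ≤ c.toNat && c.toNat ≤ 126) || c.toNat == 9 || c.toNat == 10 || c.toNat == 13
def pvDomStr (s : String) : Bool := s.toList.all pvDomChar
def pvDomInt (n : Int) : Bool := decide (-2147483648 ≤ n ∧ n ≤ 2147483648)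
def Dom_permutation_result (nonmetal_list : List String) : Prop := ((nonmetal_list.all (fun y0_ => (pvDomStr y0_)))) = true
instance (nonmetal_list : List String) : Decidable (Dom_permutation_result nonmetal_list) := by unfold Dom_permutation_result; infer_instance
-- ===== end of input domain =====

-- B buckets the 3-permutations once by a canonical key of their element set and
-- looks buckets up per combination: O(n^3) instead of A's O(n^6) filter per combination.

-- ===== PORT A =====
def permutation_result (nonmetal_list : List String) : List (List (List String)) :=
  let all_combinations := PySem.List.combinations nonmetal_list 3
  let all_permutations := PySem.List.permutations nonmetal_list 3
  let result := all_combinations.foldl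
    (fun d comb =>
      d.insert comb (all_permutations.filter
        (fun perm => PySem.Set.equal (PySem.Set.ofList comb) (PySem.Set.ofList perm))))
    PySem.Dict.empty
  result.values

-- ===== PORT B =====
-- key = tuple(sorted(set(xs)))
def pvKeyOf (xs : List String) : List String :=
  PySem.List.sorted (PySem.Set.ofList xs) (fun x => x) false

def permutation_result_alt (nonmetal_list : List String) : List (List (List String)) :=
  let buckets := (PySem.List.permutations nonmetal_list 3).foldl
    (fun d perm =>
      let key := pvKeyOf perm
      d.insert key (d.getD key [] ++ [perm]))   -- setdefault(key, []).append(perm)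
    PySem.Dict.empty
  let result := (PySem.List.combinations nonmetal_list 3).foldl
    (fun d comb => d.insert comb (buckets.getD (pvKeyOf comb) []))
    PySem.Dict.empty
  result.values

-- ===== PRECONDITION & SPEC =====
def Spec_permutation_result (nonmetal_list : List String) (out : List (List (List String))) : Prop := out = permutation_result_alt nonmetal_list
instance (nonmetal_list : List String) (out : List (List (List String))) : Decidable (Spec_permutation_result nonmetal_list out) := by unfold Spec_permutation_result; infer_instance

-- ===== CLAIM (what is proved, stated in full; the proofs are below) =====
def Claim_equal_permutation_result : Prop := ∀ (nonmetal_list : List String), Dom_permutation_result nonmetal_list → Spec_permutation_result nonmetal_list (permutation_result nonmetal_list)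

-- ===== LEMMAS AND PROOFS =====

-- the canonical keys of two lists coincide iff the lists hold the same element set
lemma pvKeyOf_eq_iff (xs ys : List String) :
    pvKeyOf xs = pvKeyOf ys ↔ (∀ a, a ∈ xs ↔ a ∈ ys) := by
  unfold pvKeyOf
  rw [PySem.List.sorted_id_eq_sorted_id_iff_perm,
    List.perm_ext_iff_of_nodup (PySem.Set.nodup_ofList _) (PySem.Set.nodup_ofList _)]
  simp [PySem.Set.mem_ofList]

-- the bucket at key k collects exactly the permutations whose key is k
lemma pvBuckets_getD (ps : List (List String)) (d : PySem.Dict (List String) (List (List String)))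
    (k : List String) :
    (ps.foldl (fun d perm => d.insert (pvKeyOf perm) (d.getD (pvKeyOf perm) [] ++ [perm])) d).getD k []
      = d.getD k [] ++ ps.filter (fun p => pvKeyOf p = k) := by
  induction ps generalizing d with
  | nil => simp
  | cons p ps ih =>
    simp only [List.foldl_cons, ih, List.filter_cons]
    rw [PySem.Dict.getD_insert]
    by_cases h : pvKeyOf p = k
    · simp [h]
    · simp [h, Ne.symm h]

theorem permutation_result_spec : Claim_equal_permutation_result := by
  intro xs _
  show permutation_result xs = permutation_result_alt xs
  unfold permutation_result permutation_result_alt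
  simp only []
  congr 1
  apply PySem.List.foldl_congr_mem
  intro d c _
  congr 1
  rw [pvBuckets_getD]
  simp only [PySem.Dict.getD, PySem.Dict.empty]
  apply List.filter_congr
  intro p _
  rw [← Bool.coe_iff_coe]
  simp only [PySem.Set.equal_iff, decide_eq_true_eq, pvKeyOf_eq_iff, PySem.Set.mem_ofList]
  constructor <;> (intro h a; exact (h a).symm)
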